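-- pv_equiv track=rewrite | github.com/PhucNguyen2020/TradingAgents | tradingagents/telegram_bot.py | _markdown_to_plain_text
-- ===== SOURCE A (Python) =====
-- def _markdown_to_plain_text(md: str) -> str:
--     """Best-effort markdown -> plain text for Telegram readability."""
--     if not md:
--         return md
--
--     lines = md.splitlines()
--     out: list[str] = []
--     in_code = False
--     for raw in lines:
--         line = raw.rstrip("\n")
--
--         if line.strip().startswith("```"):
--             in_code = not in_code
--             continue
--
--         if in_code:
--             out.append(line)
--             continue
--
--         if line.lstrip().startswith("#"):
--             out.append(line.lstrip("#").strip())
--             continue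
--
--         # Inline code
--         line = line.replace("`", "")
--
--         # Tables: remove pipes for easier reading
--         if "|" in line and line.strip().startswith("|"):
--             out.append(line.replace("|", " ").strip())
--             continue
--
--         out.append(line)
--
--     # Collapse excessive blank lines
--     cleaned: list[str] = []
--     blank = False
--     for l in out:
--         if l.strip() == "":
--             if blank:
--                 continue
--             blank = True
--             cleaned.append("")
--         else:
--             blank = False
--             cleaned.append(l)
--     return "\n".join(cleaned).strip()
-- ===== SOURCE B (Python) =====
-- def _markdown_to_plain_text(md: str) -> str:
--     """Best-effort markdown -> plain text for Telegram readability."""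
--     cleaned: list[str] = []
--     blank = False
--
--     def emit(s: str) -> None:
--         nonlocal blank
--         if s.strip() == "":
--             if not blank:
--                 cleaned.append("")
--             blank = True
--         else:
--             cleaned.append(s)
--             blank = False
--
--     in_code = False
--     for line in md.splitlines():
--         line = line.rstrip("\n")
--         if line.strip().startswith("```"):
--             in_code = not in_code
--         elif in_code:
--             emit(line)
--         elif line.lstrip().startswith("#"):
--             emit(line.lstrip("#").strip())
--         else:
--             s = line.replace("`", "")
--             if "|" in s and s.strip().startswith("|"):
--                 s = s.replace("|", " ").strip()
--             emit(s)
--     return "\n".join(cleaned).strip()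
-- ===== Notes on version B (the rewrite author's own statement) =====
-- stated objective: simpler
-- what changed: Fuses A's two sequential passes (classify lines into out, then collapse blank runs) into one streaming pass via an emit helper that keeps the blank-run flag, drops the separate intermediate list and the empty-string guard, and replaces A's append/continue chain by an if/elif chain computing the rendered line.
import Mathlib
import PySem

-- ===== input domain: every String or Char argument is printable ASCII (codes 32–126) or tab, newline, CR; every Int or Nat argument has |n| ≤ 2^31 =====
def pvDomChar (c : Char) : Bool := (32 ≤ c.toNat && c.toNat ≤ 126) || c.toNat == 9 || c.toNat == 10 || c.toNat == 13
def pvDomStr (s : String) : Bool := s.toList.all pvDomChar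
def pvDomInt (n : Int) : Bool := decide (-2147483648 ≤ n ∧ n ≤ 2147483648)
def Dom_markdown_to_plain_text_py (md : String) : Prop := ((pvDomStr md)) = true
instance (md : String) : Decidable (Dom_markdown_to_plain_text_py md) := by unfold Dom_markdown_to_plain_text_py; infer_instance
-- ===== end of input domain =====

-- B fuses A's two passes (classify, then collapse blank runs) into one streaming pass with
-- an emit helper holding the blank-run flag; objective: simpler (one pass, no guard), not faster.

-- exact hand port of str.rstrip("\n"): drop trailing '\n' characters
def pvRstripNl (cs : List Char) : List Char := (cs.reverse.dropWhile (· == '\n')).reverse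
-- exact hand port of str.lstrip("#"): drop leading '#' characters
def pvLstripHash (cs : List Char) : List Char := cs.dropWhile (· == '#')

-- ===== PORT A =====
-- one iteration of A's first loop: state (in_code, out), appending to the accumulator
def mdA_step (st : Bool × List (List Char)) (raw : List Char) : Bool × List (List Char) :=
  let line := pvRstripNl raw
  if PySem.Chars.startswith (PySem.Chars.strip line) ['`', '`', '`'] then
    (!st.1, st.2)
  else if st.1 then
    (st.1, st.2 ++ [line])
  else if PySem.Chars.startswith (PySem.Chars.lstrip line) ['#'] then
    (st.1, st.2 ++ [PySem.Chars.strip (pvLstripHash line)])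
  else
    let line := PySem.Chars.replace line ['`'] []
    if PySem.Chars.isIn ['|'] line && PySem.Chars.startswith (PySem.Chars.strip line) ['|'] then
      (st.1, st.2 ++ [PySem.Chars.strip (PySem.Chars.replace line ['|'] [' '])])
    else
      (st.1, st.2 ++ [line])

-- A's second loop: collapse runs of blank lines, state = the blank flag
def mdA_collapse (blank : Bool) : List (List Char) → List (List Char)
  | [] => []
  | l :: ls =>
    if PySem.Chars.strip l = [] then
      if blank then mdA_collapse true ls else [] :: mdA_collapse true ls
    else
      l :: mdA_collapse false ls

def markdown_to_plain_text_py (md : String) : String :=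
  if md = "" then md
  else
    let lines := PySem.Chars.splitlines md.toList
    let st := lines.foldl mdA_step (false, [])
    String.ofList (PySem.Chars.strip (PySem.Chars.join ['\n'] (mdA_collapse false st.2)))

-- ===== PORT B =====
-- B's emit helper: state (blank, cleaned); append unless a consecutive blank line
def mdB_emit (st : Bool × List (List Char)) (s : List Char) : Bool × List (List Char) :=
  if PySem.Chars.strip s = [] then
    (true, if st.1 then st.2 else st.2 ++ [[]])
  else
    (false, st.2 ++ [s])

-- one iteration of B's single loop: state (in_code, blank, cleaned)
def mdB_step (st : Bool × Bool × List (List Char)) (raw : List Char) : Bool × Bool × List (List Char) :=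
  let line := pvRstripNl raw
  if PySem.Chars.startswith (PySem.Chars.strip line) ['`', '`', '`'] then
    (!st.1, st.2)
  else if st.1 then
    (st.1, mdB_emit st.2 line)
  else if PySem.Chars.startswith (PySem.Chars.lstrip line) ['#'] then
    (st.1, mdB_emit st.2 (PySem.Chars.strip (pvLstripHash line)))
  else
    let s := PySem.Chars.replace line ['`'] []
    let s := if PySem.Chars.isIn ['|'] s && PySem.Chars.startswith (PySem.Chars.strip s) ['|'] then
      PySem.Chars.strip (PySem.Chars.replace s ['|'] [' ']) else s
    (st.1, mdB_emit st.2 s)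

def markdown_to_plain_text_py_alt (md : String) : String :=
  let st := (PySem.Chars.splitlines md.toList).foldl mdB_step (false, false, [])
  String.ofList (PySem.Chars.strip (PySem.Chars.join ['\n'] st.2.2))

-- ===== PRECONDITION & SPEC =====
def Spec_markdown_to_plain_text_py (md : String) (out : String) : Prop := out = markdown_to_plain_text_py_alt md
instance (md : String) (out : String) : Decidable (Spec_markdown_to_plain_text_py md out) := by unfold Spec_markdown_to_plain_text_py; infer_instance

-- ===== CLAIM (what is proved, stated in full; the proofs are below) =====
def Claim_equal_markdown_to_plain_text_py : Prop := ∀ (md : String), Dom_markdown_to_plain_text_py md → Spec_markdown_to_plain_text_py md (markdown_to_plain_text_py md)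

-- ===== LEMMAS AND PROOFS =====

-- A's loop as a cons-building recursion (proof device)
def mdA_loop (c : Bool) : List (List Char) → List (List Char)
  | [] => []
  | raw :: rest =>
    let line := pvRstripNl raw
    if PySem.Chars.startswith (PySem.Chars.strip line) ['`', '`', '`'] then
      mdA_loop (!c) rest
    else if c then
      line :: mdA_loop c rest
    else if PySem.Chars.startswith (PySem.Chars.lstrip line) ['#'] then
      PySem.Chars.strip (pvLstripHash line) :: mdA_loop c rest
    else
      let s := PySem.Chars.replace line ['`'] []
      (if PySem.Chars.isIn ['|'] s && PySem.Chars.startswith (PySem.Chars.strip s) ['|'] then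
        PySem.Chars.strip (PySem.Chars.replace s ['|'] [' ']) else s) :: mdA_loop c rest

-- B's fused loop as a cons-building recursion (proof device)
def mdB_rec (c b : Bool) : List (List Char) → List (List Char)
  | [] => []
  | raw :: rest =>
    let line := pvRstripNl raw
    if PySem.Chars.startswith (PySem.Chars.strip line) ['`', '`', '`'] then
      mdB_rec (!c) b rest
    else
      let s :=
        if c then line
        else if PySem.Chars.startswith (PySem.Chars.lstrip line) ['#'] then
          PySem.Chars.strip (pvLstripHash line)
        else
          let s := PySem.Chars.replace line ['`'] []
          if PySem.Chars.isIn ['|'] s && PySem.Chars.startswith (PySem.Chars.strip s) ['|'] then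
            PySem.Chars.strip (PySem.Chars.replace s ['|'] [' ']) else s
      if PySem.Chars.strip s = [] then
        (if b then mdB_rec c true rest else [] :: mdB_rec c true rest)
      else
        s :: mdB_rec c false rest

theorem mdA_fold_eq (lines : List (List Char)) : ∀ (c : Bool) (out : List (List Char)),
    (lines.foldl mdA_step (c, out)).2 = out ++ mdA_loop c lines := by
  induction lines with
  | nil => intro c out; simp [mdA_loop]
  | cons raw rest ih =>
    intro c out
    simp only [List.foldl_cons, mdA_step, mdA_loop]
    split_ifs <;> simp [ih]

theorem mdB_fold_eq (lines : List (List Char)) : ∀ (c b : Bool) (cl : List (List Char)),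
    (lines.foldl mdB_step (c, b, cl)).2.2 = cl ++ mdB_rec c b lines := by
  induction lines with
  | nil => intro c b cl; simp [mdB_rec]
  | cons raw rest ih =>
    intro c b cl
    simp only [List.foldl_cons, mdB_step, mdB_emit, mdB_rec]
    split_ifs <;> simp [ih]

theorem collapse_loop_eq (lines : List (List Char)) : ∀ (c b : Bool),
    mdA_collapse b (mdA_loop c lines) = mdB_rec c b lines := by
  induction lines with
  | nil => intro c b; simp [mdA_loop, mdB_rec, mdA_collapse]
  | cons raw rest ih =>
    intro c b
    simp only [mdA_loop, mdB_rec]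
    split_ifs with h1 h2 h3
    · exact ih _ _
    all_goals simp only [mdA_collapse]; split_ifs <;> simp [ih]

-- ===== VERDICT (by name: the statement is the Claim_ definition above) =====
theorem markdown_to_plain_text_py_spec : Claim_equal_markdown_to_plain_text_py := by
  intro md _
  unfold Spec_markdown_to_plain_text_py markdown_to_plain_text_py markdown_to_plain_text_py_alt
  by_cases h : md = ""
  · subst h; decide
  · simp only [if_neg h, mdA_fold_eq, mdB_fold_eq, List.nil_append, collapse_loop_eq]
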